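-- pv_equiv track=rewrite | github.com/ramesh-kasula/2020501091_ramesh_CP_elect | 06-get_kth_digit-Python/get_kth_digit.py | fun_get_kth_digit
-- ===== SOURCE A (Python) =====
-- def fun_get_kth_digit(digit, k):
-- 	if len(str(digit))<k:
-- 		return 0
-- 	digit=abs(digit)
-- 	r=0
-- 	for i in range(k+1):
-- 		r=digit%10
-- 		digit=digit//10
-- 	return r
-- ===== SOURCE B (Python) =====
-- def fun_get_kth_digit(digit, k):
--     if k < 0 or k >= len(str(abs(digit))):
--         return 0
--     return (abs(digit) // 10 ** k) % 10
-- ===== Notes on version B (the rewrite author's own statement) =====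
-- stated objective: simpler
-- what changed: replaces the k+1-step divide loop by the closed-form digit extraction (abs(digit)//10**k)%10 behind a single range guard
import Mathlib
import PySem

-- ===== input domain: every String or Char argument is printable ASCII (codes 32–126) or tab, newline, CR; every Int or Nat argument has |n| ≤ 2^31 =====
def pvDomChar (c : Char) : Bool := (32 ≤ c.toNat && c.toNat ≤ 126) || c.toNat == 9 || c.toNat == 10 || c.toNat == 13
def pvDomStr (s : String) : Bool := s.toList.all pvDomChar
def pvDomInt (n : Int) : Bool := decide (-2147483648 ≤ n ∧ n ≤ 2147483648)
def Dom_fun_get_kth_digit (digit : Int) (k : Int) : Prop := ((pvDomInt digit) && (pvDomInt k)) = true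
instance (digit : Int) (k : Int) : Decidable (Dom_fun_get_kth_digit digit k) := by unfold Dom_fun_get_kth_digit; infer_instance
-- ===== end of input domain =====

-- B replaces A's k+1-step divide loop by the closed-form digit extraction (|digit| // 10^k) % 10 behind a single range guard (objective: simpler).
-- ===== PORT A =====
def fun_get_kth_digit (digit : Int) (k : Int) : Int :=
  if (PySem.Str.len (PySem.Int.toStr digit)) < k then 0
  else
    -- digit = abs(digit); r = 0; for i in range(k+1): r = digit % 10; digit = digit // 10
    let s := (PySem.List.pyRange 0 (k + 1) 1).foldl
      (fun (s : Int × Int) _ => (PySem.Int.mod s.2 10, PySem.Int.floordiv s.2 10)) (0, |digit|)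
    s.1

-- ===== PORT B =====
def fun_get_kth_digit_alt (digit : Int) (k : Int) : Int :=
  if k < 0 ∨ PySem.Str.len (PySem.Int.toStr |digit|) ≤ k then 0
  else PySem.Int.mod (PySem.Int.floordiv |digit| (10 ^ k.toNat)) 10

-- ===== PRECONDITION & SPEC =====
def Spec_fun_get_kth_digit (digit : Int) (k : Int) (out : Int) : Prop := out = fun_get_kth_digit_alt digit k
instance (digit : Int) (k : Int) (out : Int) : Decidable (Spec_fun_get_kth_digit digit k out) := by unfold Spec_fun_get_kth_digit; infer_instance

-- ===== CLAIM (what is proved, stated in full; the proofs are below) =====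
def Claim_equal_fun_get_kth_digit : Prop := ∀ (digit : Int) (k : Int), Dom_fun_get_kth_digit digit k → Spec_fun_get_kth_digit digit k (fun_get_kth_digit digit k)

-- ===== LEMMAS AND PROOFS =====
theorem pv_toDigitsCore_lt (fuel : Nat) : ∀ n : Nat, n < fuel → n < 10 ^ (Nat.toDigitsCore 10 fuel n []).length := by
  induction fuel with
  | zero => intro n h; omega
  | succ f ih =>
    intro n h
    rw [Nat.toDigitsCore]
    by_cases h0 : n / 10 = 0
    · simp [h0]; omega
    · simp only [h0, if_false]
      have hih := ih (n / 10) (by omega)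
      rw [Nat.toDigitsCore_lens_eq, pow_succ]
      calc n < (n / 10 + 1) * 10 := by omega
      _ ≤ 10 ^ (Nat.toDigitsCore 10 f (n/10) []).length * 10 := by
            apply Nat.mul_le_mul_right; omega
theorem pv_toDigits_lt (n : Nat) : n < 10 ^ (Nat.toDigits 10 n).length :=
  pv_toDigitsCore_lt (n + 1) n (Nat.lt_succ_self n)
theorem pv_toDigits_len_pos (n : Nat) : 1 ≤ (Nat.toDigits 10 n).length := by
  rw [Nat.toDigits, Nat.toDigitsCore]
  by_cases h0 : n / 10 = 0
  · simp [h0]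
  · simp only [h0, if_false]
    rw [Nat.toDigitsCore_lens_eq]
    omega
theorem pv_len_pos (d : Int) : 1 ≤ PySem.Str.len (PySem.Int.toStr d) := by
  simp only [PySem.Str.len_eq, PySem.Int.toStr, String.toList_ofList, PySem.Int.toChars]
  by_cases hd : d < 0
  · rw [if_pos hd]; simp
  · rw [if_neg hd]
    have := pv_toDigits_len_pos d.toNat
    omega
theorem pv_len_abs_le (d : Int) : PySem.Str.len (PySem.Int.toStr |d|) ≤ PySem.Str.len (PySem.Int.toStr d) := by
  have habs := abs_nonneg d
  simp only [PySem.Str.len_eq, PySem.Int.toStr, String.toList_ofList, PySem.Int.toChars]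
  by_cases hd : d < 0
  · rw [if_neg (by omega), if_pos hd]
    have h1 : |d|.toNat = d.natAbs := by
      rw [Int.abs_eq_natAbs, Int.toNat_natCast]
    rw [h1]; simp
  · rw [if_neg (by omega), if_neg hd]
    rw [abs_of_nonneg (by omega)]
theorem pv_abs_lt (d : Int) : |d| < (10 : Int) ^ (PySem.Str.len (PySem.Int.toStr |d|)).toNat := by
  have habs := abs_nonneg d
  simp only [PySem.Str.len_eq, PySem.Int.toStr, String.toList_ofList, PySem.Int.toChars]
  rw [if_neg (by omega)]
  have h := pv_toDigits_lt |d|.toNat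
  have h2 : |d| = ((|d|.toNat : Nat) : Int) := by omega
  rw [h2, Int.toNat_natCast]
  exact_mod_cast h
theorem pv_loop (n : Nat) : ∀ m : Nat,
    (PySem.List.pyRange 0 ((m : Int)) 1).foldl
      (fun (s : Int × Int) _ => (PySem.Int.mod s.2 10, PySem.Int.floordiv s.2 10)) (0, (n : Int))
    = ((if m = 0 then (0:Int) else ((n / 10 ^ (m - 1)) % 10 : Nat)), ((n / 10 ^ m : Nat) : Int)) := by
  intro m
  induction m with
  | zero => simp [PySem.List.pyRange]
  | succ m ih =>
    have hcast : ((m : Int) + 1) = ((m + 1 : Nat) : Int) := by push_cast; ring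
    rw [← hcast, PySem.List.pyRange_one_succ_right (by positivity), List.foldl_append, ih]
    simp only [List.foldl_cons, List.foldl_nil]
    by_cases hm : m = 0
    · subst hm
      simp
    · simp only [Nat.succ_ne_zero, if_false, Nat.add_sub_cancel]
      simp [pow_succ, ← Nat.div_div_eq_div_mul]

theorem pv_main (digit k : Int) : fun_get_kth_digit digit k = fun_get_kth_digit_alt digit k := by
  unfold fun_get_kth_digit fun_get_kth_digit_alt
  by_cases hk : k < 0
  · rw [if_pos (Or.inl hk), if_neg (by have := pv_len_pos digit; omega)]
    have hempty : PySem.List.pyRange 0 (k + 1) 1 = [] := by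
      rw [PySem.List.pyRange]
      simp only [if_neg (by omega : ¬ (1:Int) = 0)]
      rw [if_pos (by omega : (0:Int) < 1), if_neg (by omega : ¬ (0:Int) < k + 1)]
      simp
    simp [hempty]
  · -- k ≥ 0
    have hk0 : 0 ≤ k := by omega
    set kn := k.toNat with hkn
    have hkeq : k = (kn : Int) := by omega
    have habs : |digit| = ((|digit|.toNat : Nat) : Int) := by
      have := abs_nonneg digit; omega
    have hloop := pv_loop |digit|.toNat (kn + 1)
    have hcast : ((kn + 1 : Nat) : Int) = k + 1 := by push_cast; omega
    rw [hcast] at hloop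
    by_cases hga : PySem.Str.len (PySem.Int.toStr digit) < k
    · -- A guard fires; B guard fires too
      rw [if_pos hga, if_pos (Or.inr (by have := pv_len_abs_le digit; omega))]
    · rw [if_neg hga]
      by_cases hgb : PySem.Str.len (PySem.Int.toStr |digit|) ≤ k
      · -- B guard fires; the loop value is 0 as well
        rw [if_pos (Or.inr hgb), habs, hloop]
        simp only [Nat.succ_ne_zero, if_false, Nat.add_sub_cancel]
        have hlt := pv_abs_lt digit
        have hle : (10:Int) ^ (PySem.Str.len (PySem.Int.toStr |digit|)).toNat ≤ (10:Int) ^ kn := by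
          apply pow_le_pow_right₀ (by norm_num)
          have := pv_len_pos |digit|
          omega
        have hint : |digit| < (10:Int) ^ kn := lt_of_lt_of_le hlt hle
        have hnd : |digit|.toNat < 10 ^ kn := by
          have h10 : ((10 ^ kn : Nat) : Int) = (10:Int) ^ kn := by push_cast; ring
          omega
        have hz : |digit|.toNat / 10 ^ kn = 0 := Nat.div_eq_of_lt hnd
        simp [hz]
      · rw [if_neg (not_or.mpr ⟨hk, hgb⟩), habs, hloop]
        simp only [Nat.succ_ne_zero, if_false, Nat.add_sub_cancel]
        have h10 : (10:Int) ^ kn = ((10 ^ kn : Nat) : Int) := by push_cast; ring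
        rw [h10, PySem.Int.floordiv_natCast]
        simp

-- ===== VERDICT (by name: the statement is the Claim_ definition above) =====
theorem fun_get_kth_digit_spec : Claim_equal_fun_get_kth_digit := by
  intro digit k _
  exact pv_main digit k
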